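-- pv_equiv track=rewrite | github.com/linsalefe/EduFlow-Automator | src/generators/pexels_client.py | _pick_best_src
-- ===== SOURCE A (Python) =====
-- from typing import Any, Optional
--
-- def _pick_best_src(src: dict[str, str]) -> Optional[str]:
--     # prioridade de qualidade
--     for key in ("original", "large2x", "large", "portrait"):
--         if key in src and src[key]:
--             return src[key]
--     # fallback: qualquer um
--     for v in src.values():
--         if v:
--             return v
--     return None
-- ===== SOURCE B (Python) =====
-- from typing import Optional
--
-- _RANK = {"original": 0, "large2x": 1, "large": 2, "portrait": 3}
--
-- def _pick_best_src(src: dict[str, str]) -> Optional[str]: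
--     best = None  # (rank, value) with the smallest rank seen so far
--     for k, v in src.items():
--         if not v:
--             continue
--         r = _RANK.get(k, 4)
--         if best is None or r < best[0]:
--             best = (r, v)
--     return best[1] if best is not None else None
-- ===== Notes on version B (the rewrite author's own statement) =====
-- stated objective: alternative
-- what changed: Replaces A's two sequential scans (priority-key probes, each a dict lookup, then a values() fallback scan) by a single pass over the items that tracks the value with the smallest priority rank (non-priority keys get sentinel rank 4, strict < keeps the first among ties).
import Mathlib
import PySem

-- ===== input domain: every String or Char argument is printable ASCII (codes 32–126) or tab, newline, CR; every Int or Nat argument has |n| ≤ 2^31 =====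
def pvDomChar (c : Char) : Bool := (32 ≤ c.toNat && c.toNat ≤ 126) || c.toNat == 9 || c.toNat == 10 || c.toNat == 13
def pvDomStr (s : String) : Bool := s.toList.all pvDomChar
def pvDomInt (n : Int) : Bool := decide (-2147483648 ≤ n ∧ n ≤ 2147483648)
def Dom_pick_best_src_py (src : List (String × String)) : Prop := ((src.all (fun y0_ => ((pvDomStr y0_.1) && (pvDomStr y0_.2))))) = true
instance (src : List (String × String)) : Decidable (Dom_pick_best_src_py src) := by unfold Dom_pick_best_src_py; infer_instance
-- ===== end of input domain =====

-- B replaces A's two sequential scans (priority probes then values() fallback) by one pass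
-- tracking the truthy value of smallest priority rank; same O(n) cost, different decomposition.


-- ===== PORT A =====
-- 'key in src and src[key]' on the dict: first-match lookup in the association list
def lookupVal? : List (String × String) → String → Option String
  | [], _ => none
  | (k, v) :: rest, key => if k = key then some v else lookupVal? rest key

-- A's first loop: early-return over the priority-key tuple
def pickPriority (src : List (String × String)) : List String → Option String
  | [] => none
  | key :: rest =>
    match lookupVal? src key with
    | some v => if v ≠ "" then some v else pickPriority src rest
    | none => pickPriority src rest

-- A's second loop: first truthy value in src.values()
def pickFallback : List (String × String) → Option String
  | [] => none
  | (_, v) :: rest => if v ≠ "" then some v else pickFallback rest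

def pick_best_src_py (src : List (String × String)) : Option String :=
  match pickPriority src ["original", "large2x", "large", "portrait"] with
  | some v => some v
  | none => pickFallback src

-- ===== PORT B =====
-- _RANK.get(k, 4)
def rankOf (k : String) : Nat :=
  if k = "original" then 0 else if k = "large2x" then 1
  else if k = "large" then 2 else if k = "portrait" then 3 else 4

-- the loop body of B: skip empty values, keep the smaller rank (strict <, first wins ties)
def bStep (best : Option (Nat × String)) (p : String × String) : Option (Nat × String) :=
  if p.2 = "" then best
  else
    match best with
    | none => some (rankOf p.1, p.2)
    | some (r0, v0) => if rankOf p.1 < r0 then some (rankOf p.1, p.2) else some (r0, v0)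

def pick_best_src_py_alt (src : List (String × String)) : Option String :=
  (src.foldl bStep none).map Prod.snd

-- ===== PRECONDITION & SPEC =====
-- Pre_ excludes association lists with duplicate keys: they represent no Python dict (the
-- argument of A is a dict, whose keys are unique), so A's behaviour there is not defined by A.
def Pre_pick_best_src_py (src : List (String × String)) : Prop :=
  (src.map Prod.fst).Nodup
instance (src : List (String × String)) : Decidable (Pre_pick_best_src_py src) := by
  unfold Pre_pick_best_src_py; infer_instance

def pvWitness_pick_best_src_py : (List (String × String)) :=
  [("large", ""), ("tiny", "u1"), ("original", "u0")]

def Spec_pick_best_src_py (src : List (String × String)) (out : Option String) : Prop := out = pick_best_src_py_alt src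
instance (src : List (String × String)) (out : Option String) : Decidable (Spec_pick_best_src_py src out) := by unfold Spec_pick_best_src_py; infer_instance

-- ===== CLAIM (what is proved, stated in full; the proofs are below) =====
def Claim_equal_pick_best_src_py : Prop := ∀ (src : List (String × String)), Dom_pick_best_src_py src → Pre_pick_best_src_py src → Spec_pick_best_src_py src (pick_best_src_py src)

-- ===== LEMMAS AND PROOFS =====

-- left-biased minimum-by-rank of two optional entries
def pick2 (a b : Option (Nat × String)) : Option (Nat × String) :=
  match a, b with
  | none, b => b
  | some a, none => some a
  | some a, some b => if b.1 < a.1 then some b else some a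

-- the truthy entries of src, tagged with their rank
def entries (src : List (String × String)) : List (Nat × String) :=
  (src.filter (fun p => p.2 ≠ "")).map (fun p => (rankOf p.1, p.2))

def mSel (l : List (Nat × String)) : Option (Nat × String) :=
  l.foldl (fun a x => pick2 a (some x)) none

lemma pick2_assoc (a b c : Option (Nat × String)) :
    pick2 (pick2 a b) c = pick2 a (pick2 b c) := by
  rcases a with _ | ⟨a1, a2⟩
  · rfl
  rcases b with _ | ⟨b1, b2⟩
  · rfl
  rcases c with _ | ⟨c1, c2⟩
  · simp only [pick2]; split_ifs <;> rfl
  simp only [pick2]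
  by_cases h1 : b1 < a1 <;> by_cases h2 : c1 < b1 <;>
    simp only [h1, h2, if_true, if_false] <;>
    split_ifs <;> first | rfl | omega

lemma entries_cons_skip (p : String × String) (rest : List (String × String)) (h : p.2 = "") :
    entries (p :: rest) = entries rest := by
  simp [entries, h]

lemma entries_cons_keep (p : String × String) (rest : List (String × String)) (h : p.2 ≠ "") :
    entries (p :: rest) = (rankOf p.1, p.2) :: entries rest := by
  simp [entries, h]

lemma bStep_eq (b : Option (Nat × String)) (p : String × String) (h : p.2 ≠ "") :
    bStep b p = pick2 b (some (rankOf p.1, p.2)) := by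
  rcases b with _ | ⟨r0, v0⟩ <;> simp [bStep, pick2, h]

lemma foldl_bStep (l : List (String × String)) : ∀ b,
    l.foldl bStep b = (entries l).foldl (fun a x => pick2 a (some x)) b := by
  induction l with
  | nil => intro b; simp [entries]
  | cons p rest ih =>
    intro b
    by_cases h : p.2 = ""
    · rw [List.foldl_cons, entries_cons_skip p rest h]
      have hb : bStep b p = b := by simp [bStep, h]
      rw [hb]; exact ih b
    · rw [List.foldl_cons, entries_cons_keep p rest h, List.foldl_cons, bStep_eq b p h]
      exact ih _

lemma foldl_pick2_hoist (l : List (Nat × String)) : ∀ b,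
    l.foldl (fun a x => pick2 a (some x)) b = pick2 b (mSel l) := by
  induction l with
  | nil => intro b; cases b <;> rfl
  | cons x rest ih =>
    intro b
    have hm : mSel (x :: rest) = pick2 (some x) (mSel rest) := by
      unfold mSel
      rw [List.foldl_cons, ih (pick2 none (some x))]
      rfl
    rw [List.foldl_cons, ih (pick2 b (some x)), hm, pick2_assoc]

lemma alt_eq (src : List (String × String)) :
    pick_best_src_py_alt src = (mSel (entries src)).map Prod.snd := by
  unfold pick_best_src_py_alt
  rw [foldl_bStep, foldl_pick2_hoist]
  rfl

lemma mSel_mem_aux (l : List (Nat × String)) : ∀ b x,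
    l.foldl (fun a y => pick2 a (some y)) b = some x → x ∈ l ∨ b = some x := by
  induction l with
  | nil => intro b x h; right; simpa using h
  | cons y rest ih =>
    intro b x h
    rw [List.foldl_cons] at h
    rcases ih _ _ h with hm | hb
    · left; exact List.mem_cons_of_mem _ hm
    · rcases b with _ | b
      · left
      
        have : y = x := by simpa [pick2] using hb
        rw [this]; exact List.mem_cons_self
      · simp only [pick2] at hb
        split_ifs at hb
        · left
          have : y = x := by simpa using hb
          rw [this]; exact List.mem_cons_self
        · right; exact hb

lemma mSel_mem (l : List (Nat × String)) (x : Nat × String) (h : mSel l = some x) : x ∈ l := by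
  rcases mSel_mem_aux l none x h with hm | hb
  · exact hm
  · simp at hb

-- mSel of a list whose ranks are all equal is its head
lemma mSel_const (l : List (Nat × String)) (r : Nat) (hall : ∀ x ∈ l, x.1 = r) :
    mSel l = l.head? := by
  cases l with
  | nil => rfl
  | cons x rest =>
    unfold mSel
    rw [List.foldl_cons, foldl_pick2_hoist]
    cases hm : mSel rest with
    | none => rfl
    | some y =>
      have hy : y ∈ rest := mSel_mem rest y hm
      have h1 : y.1 = r := hall y (List.mem_cons_of_mem _ hy)
      have h2 : x.1 = r := hall x List.mem_cons_self
      simp only [pick2]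
      rw [if_neg (by omega)]
      rfl

-- mSel returns the unique minimal-rank element
lemma mSel_unique_min (l : List (Nat × String)) (x : Nat × String)
    (hx : x ∈ l) (hmin : ∀ y ∈ l, x.1 ≤ y.1) (huniq : ∀ y ∈ l, y.1 = x.1 → y = x) :
    mSel l = some x := by
  induction l with
  | nil => simp at hx
  | cons z rest ih =>
    unfold mSel
    rw [List.foldl_cons, foldl_pick2_hoist]
    by_cases hzx : z = x
    · subst hzx
      cases hm : mSel rest with
      | none => rfl
      | some y =>
        have hy : y ∈ rest := mSel_mem rest y hm
        have : z.1 ≤ y.1 := hmin y (List.mem_cons_of_mem _ hy)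
        simp only [pick2]
        rw [if_neg (by omega)]
    · have hx' : x ∈ rest := by
        rcases List.mem_cons.mp hx with h | h
        · exact absurd h.symm hzx
        · exact h
      have hrec : mSel rest = some x :=
        ih hx' (fun y hy => hmin y (List.mem_cons_of_mem _ hy))
               (fun y hy => huniq y (List.mem_cons_of_mem _ hy))
      rw [hrec]
      have hne : z.1 ≠ x.1 := fun h => hzx (huniq z List.mem_cons_self h)
      have hle : x.1 ≤ z.1 := hmin z List.mem_cons_self
      simp only [pick2]
      rw [if_pos (by omega)]

lemma entries_mem (src : List (String × String)) (x : Nat × String) :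
    x ∈ entries src ↔ ∃ k, (k, x.2) ∈ src ∧ x.2 ≠ "" ∧ x.1 = rankOf k := by
  unfold entries
  simp only [List.mem_map, List.mem_filter]
  constructor
  · rintro ⟨⟨k, v⟩, ⟨hmem, hne⟩, rfl⟩
    exact ⟨k, hmem, by simpa using hne, rfl⟩
  · rintro ⟨k, hmem, hne, h1⟩
    refine ⟨(k, x.2), ⟨hmem, by simpa using hne⟩, ?_⟩
    obtain ⟨x1, x2⟩ := x
    simp_all

lemma rankOf_inj (k k' : String) (h4 : rankOf k < 4) (h : rankOf k = rankOf k') : k = k' := by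
  unfold rankOf at *
  split_ifs at * <;> simp_all

lemma rankOf_le4 (k : String) : rankOf k ≤ 4 := by
  unfold rankOf; split_ifs <;> omega

lemma lookup_none (src : List (String × String)) (key : String) :
    lookupVal? src key = none → ∀ v, (key, v) ∉ src := by
  induction src with
  | nil => intro _ v hv; simp at hv
  | cons p rest ih =>
    intro h v hv
    obtain ⟨k0, v0⟩ := p
    unfold lookupVal? at h
    by_cases hk : k0 = key
    · rw [if_pos hk] at h; simp at h
    · rw [if_neg hk] at h
      rcases List.mem_cons.mp hv with h' | h'
      · injection h' with h1 h2; exact hk h1.symm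
      · exact ih h v h'

lemma lookup_mem (src : List (String × String)) (key v : String) :
    lookupVal? src key = some v → (key, v) ∈ src := by
  induction src with
  | nil => intro h; simp [lookupVal?] at h
  | cons p rest ih =>
    intro h
    obtain ⟨k0, v0⟩ := p
    unfold lookupVal? at h
    by_cases hk : k0 = key
    · rw [if_pos hk] at h
      injection h with h1
      rw [← hk, h1]
      exact List.mem_cons_self
    · rw [if_neg hk] at h
      exact List.mem_cons_of_mem _ (ih h)

lemma nodup_val_unique (src : List (String × String)) (key v : String) :
    (src.map Prod.fst).Nodup → lookupVal? src key = some v →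
    ∀ v', (key, v') ∈ src → v' = v := by
  induction src with
  | nil => intro _ _ v' h'; simp at h'
  | cons p rest ih =>
    intro hnd h v' h'
    obtain ⟨k0, v0⟩ := p
    simp only [List.map_cons, List.nodup_cons] at hnd
    unfold lookupVal? at h
    by_cases hk : k0 = key
    · rw [if_pos hk] at h
      injection h with h1
      rcases List.mem_cons.mp h' with he | hm
      · injection he with he1 he2; rw [he2, h1]
      · exfalso
        apply hnd.1
        rw [hk]
        exact List.mem_map.mpr ⟨(key, v'), hm, rfl⟩
    · rw [if_neg hk] at h
      rcases List.mem_cons.mp h' with he | hm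
      · injection he with he1 he2; exact absurd he1.symm hk
      · exact ih hnd.2 h v' hm

-- if the probe of a priority key fails (absent or empty), no entry carries its rank
lemma no_rank (src : List (String × String)) (hnd : (src.map Prod.fst).Nodup)
    (key : String) (hlt : rankOf key < 4)
    (h : lookupVal? src key = none ∨ lookupVal? src key = some "") :
    ∀ x ∈ entries src, x.1 ≠ rankOf key := by
  intro x hx heq
  rw [entries_mem] at hx
  obtain ⟨k, hmem, hne, hrk⟩ := hx
  have hkey : k = key := rankOf_inj k key (by omega) (by omega)
  subst hkey
  rcases h with h | h
  · exact lookup_none src k h x.2 hmem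
  · exact hne (nodup_val_unique src k "" hnd h x.2 hmem)

lemma fallback_eq (src : List (String × String)) :
    pickFallback src = ((entries src).head?).map Prod.snd := by
  induction src with
  | nil => rfl
  | cons p rest ih =>
    obtain ⟨k, v⟩ := p
    by_cases h : v = ""
    · rw [entries_cons_skip (k, v) rest h]
      simpa [pickFallback, h] using ih
    · rw [entries_cons_keep (k, v) rest h]
      simp [pickFallback, h]

-- the hit case: priority key found with truthy value, all smaller ranks absent
lemma hit_case (src : List (String × String)) (hnd : (src.map Prod.fst).Nodup)
    (key v : String) (hlt : rankOf key < 4)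
    (h : lookupVal? src key = some v) (hv : v ≠ "")
    (hmin : ∀ x ∈ entries src, rankOf key ≤ x.1) :
    (mSel (entries src)).map Prod.snd = some v := by
  have hmem : (rankOf key, v) ∈ entries src := by
    rw [entries_mem]
    exact ⟨key, lookup_mem src key v h, hv, rfl⟩
  rw [mSel_unique_min (entries src) (rankOf key, v) hmem hmin ?_]
  · rfl
  · intro y hy hyr
    rw [entries_mem] at hy
    obtain ⟨k, hkmem, hne, hrk⟩ := hy
    have hkk : k = key := rankOf_inj k key (by omega) (by omega)
    subst hkk
    have h2 : y.2 = v := nodup_val_unique src k v hnd h y.2 hkmem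
    obtain ⟨y1, y2⟩ := y
    simp_all

lemma pickPriority_cons_cont (src : List (String × String)) (key : String) (rest : List String)
    (h : lookupVal? src key = none ∨ lookupVal? src key = some "") :
    pickPriority src (key :: rest) = pickPriority src rest := by
  rcases h with h | h <;> simp [pickPriority, h]

lemma pickPriority_cons_hit (src : List (String × String)) (key v : String) (rest : List String)
    (h : lookupVal? src key = some v) (hv : v ≠ "") :
    pickPriority src (key :: rest) = some v := by
  simp [pickPriority, h, hv]

lemma probe_split (src : List (String × String)) (key : String)
    (h : ¬ ∃ v, lookupVal? src key = some v ∧ v ≠ "") :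
    lookupVal? src key = none ∨ lookupVal? src key = some "" := by
  cases hl : lookupVal? src key with
  | none => left; rfl
  | some v =>
    right
    by_cases hv : v = ""
    · rw [hv]
    · exact absurd ⟨v, hl, hv⟩ h

-- ===== VERDICT (by name: the statement is the Claim_ definition above) =====
theorem pick_best_src_py_spec : Claim_equal_pick_best_src_py := by
  intro src _ hnd
  unfold Spec_pick_best_src_py
  rw [alt_eq]
  unfold pick_best_src_py
  by_cases c0 : ∃ v, lookupVal? src "original" = some v ∧ v ≠ ""
  · obtain ⟨v, h, hv⟩ := c0
    rw [pickPriority_cons_hit src _ v _ h hv,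
        hit_case src hnd "original" v (by simp [rankOf]) h hv (fun x _ => by simp [rankOf])]
  · have hc0 := probe_split src "original" c0
    have habs0 := no_rank src hnd "original" (by simp [rankOf]) hc0
    rw [pickPriority_cons_cont src _ _ hc0]
    by_cases c1 : ∃ v, lookupVal? src "large2x" = some v ∧ v ≠ ""
    · obtain ⟨v, h, hv⟩ := c1
      rw [pickPriority_cons_hit src _ v _ h hv,
          hit_case src hnd "large2x" v (by simp [rankOf]) h hv ?_]
      intro x hx
      have := habs0 x hx; simp [rankOf] at this ⊢; omega
    · have hc1 := probe_split src "large2x" c1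
      have habs1 := no_rank src hnd "large2x" (by simp [rankOf]) hc1
      rw [pickPriority_cons_cont src _ _ hc1]
      by_cases c2 : ∃ v, lookupVal? src "large" = some v ∧ v ≠ ""
      · obtain ⟨v, h, hv⟩ := c2
        rw [pickPriority_cons_hit src _ v _ h hv,
            hit_case src hnd "large" v (by simp [rankOf]) h hv ?_]
        intro x hx
        have := habs0 x hx; have := habs1 x hx
        simp [rankOf] at * ; omega
      · have hc2 := probe_split src "large" c2
        have habs2 := no_rank src hnd "large" (by simp [rankOf]) hc2
        rw [pickPriority_cons_cont src _ _ hc2]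
        by_cases c3 : ∃ v, lookupVal? src "portrait" = some v ∧ v ≠ ""
        · obtain ⟨v, h, hv⟩ := c3
          rw [pickPriority_cons_hit src _ v _ h hv,
              hit_case src hnd "portrait" v (by simp [rankOf]) h hv ?_]
          intro x hx
          have := habs0 x hx; have := habs1 x hx; have := habs2 x hx
          simp [rankOf] at * ; omega
        · have hc3 := probe_split src "portrait" c3
          have habs3 := no_rank src hnd "portrait" (by simp [rankOf]) hc3
          rw [pickPriority_cons_cont src _ _ hc3]
          show pickFallback src = _
          rw [fallback_eq, mSel_const (entries src) 4 ?_]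
          intro x hx
          rw [entries_mem] at hx
          obtain ⟨k, _, _, hrk⟩ := hx
          have h4 := rankOf_le4 k
          have := habs0 x (by rw [entries_mem]; exact ⟨k, by assumption, by assumption, hrk⟩)
          have := habs1 x (by rw [entries_mem]; exact ⟨k, by assumption, by assumption, hrk⟩)
          have := habs2 x (by rw [entries_mem]; exact ⟨k, by assumption, by assumption, hrk⟩)
          have := habs3 x (by rw [entries_mem]; exact ⟨k, by assumption, by assumption, hrk⟩)
          simp [rankOf] at * ; omega
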